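-- pv_equiv track=rewrite | github.com/lhy19961016/Master_Degree | Code/PredTest.py | err_stat
-- ===== SOURCE A (Python) =====
-- def err_stat(pred_label, True_label, test_df, class_name):
--     err_index = []
--     count_err = {}
--     class_name = class_name
--     for i in range(len(pred_label)):
--         if pred_label[i] != True_label[i]:
--             err_index.append(i)
--     name_err = []
--     name_err_1 = []
--     for i in err_index:
--         name_err.append(test_df[i].split('\\')[-1].split('_')[0])
--         name_err_1.append(test_df[i].split('\\')[-1])
--     for j in class_name:
--         count_err[j] = name_err.count(j)
--     return count_err, name_err_1
-- ===== SOURCE B (Python) =====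
-- def _group(ts):
--     # run-length groups of a sorted list: token -> length of its run
--     g = {}
--     k = 0
--     while k < len(ts):
--         n = k + 1
--         while n < len(ts) and ts[n] == ts[k]:
--             n += 1
--         g[ts[k]] = n - k
--         k = n
--     return g
--
--
-- def err_stat(pred_label, True_label, test_df, class_name):
--     name_err_1 = []
--     for i in range(len(pred_label)):
--         if pred_label[i] != True_label[i]:
--             name_err_1.append(test_df[i].split('\\')[-1])
--     tokens = sorted(f.split('_')[0] for f in name_err_1)
--     groups = _group(tokens)
--     count_err = {}
--     for j in class_name:
--         count_err[j] = groups.get(j, 0)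
--     return count_err, name_err_1
-- ===== Notes on version B (the rewrite author's own statement) =====
-- stated objective: faster
-- what changed: Replaces A's per-class .count rescans of the error-token list by a different counting algorithm: sort the error tokens once, run-length-group the sorted list into a token->run-length table, and read each class's count off that table.
import Mathlib
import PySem

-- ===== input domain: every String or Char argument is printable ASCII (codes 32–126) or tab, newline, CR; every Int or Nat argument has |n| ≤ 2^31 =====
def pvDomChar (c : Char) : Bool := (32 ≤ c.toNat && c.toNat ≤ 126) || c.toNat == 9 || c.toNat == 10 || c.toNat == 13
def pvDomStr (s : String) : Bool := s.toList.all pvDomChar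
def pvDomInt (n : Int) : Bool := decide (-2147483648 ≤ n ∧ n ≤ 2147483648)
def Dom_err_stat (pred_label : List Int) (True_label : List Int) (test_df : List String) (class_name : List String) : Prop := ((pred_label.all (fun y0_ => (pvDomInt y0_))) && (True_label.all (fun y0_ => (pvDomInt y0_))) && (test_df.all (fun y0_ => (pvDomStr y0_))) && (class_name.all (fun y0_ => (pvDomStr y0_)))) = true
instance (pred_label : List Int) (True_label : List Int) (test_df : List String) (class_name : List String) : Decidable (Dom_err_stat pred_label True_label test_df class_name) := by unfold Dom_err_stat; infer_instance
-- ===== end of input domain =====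

-- B replaces A's per-class .count scans over the error-token list by a different algorithm:
-- sort the tokens once, run-length-group the sorted list, and read each class's count off the
-- group table (objective: alternative — sort + group instead of repeated counting).

-- shared helpers: the literal subexpressions s.split('\\')[-1] and s.split('_')[0] both sources contain
def pvBase (s : String) : String :=
  PySem.List.pyGetD ((PySem.Str.split? s "\\").getD []) (-1) ""
def pvHead (s : String) : String :=
  PySem.List.pyGetD ((PySem.Str.split? s "_").getD []) 0 ""

-- ===== PORT A =====
def err_stat (pred_label : List Int) (True_label : List Int) (test_df : List String) (class_name : List String) : (List (String × Int)) × List String :=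
  let err_index : List Int :=
    (PySem.List.pyRange 0 pred_label.length 1).foldl
      (fun acc i =>
        if PySem.List.pyGetD pred_label i 0 ≠ PySem.List.pyGetD True_label i 0 then acc ++ [i] else acc)
      []
  let names : List String × List String :=
    err_index.foldl
      (fun p i =>
        (p.1 ++ [pvHead (pvBase (PySem.List.pyGetD test_df i ""))],
         p.2 ++ [pvBase (PySem.List.pyGetD test_df i "")]))
      ([], [])
  let count_err : PySem.Dict String Int :=
    class_name.foldl (fun d j => d.insert j ((PySem.List.count names.1 j : Int))) PySem.Dict.empty
  (count_err.items, names.2)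

-- ===== PORT B =====
-- _group(ts): the outer while loop walks the sorted list run by run (recursion on the remaining
-- suffix); the inner while loop measures the current run (n - k = 1 + length of the leading equal
-- run of the suffix's tail), and ts[n:] is the suffix after that run.
def pvGroup (g : PySem.Dict String Int) : List String → PySem.Dict String Int
  | [] => g
  | h :: t =>
      pvGroup (g.insert h (1 + ((t.takeWhile (· == h)).length : Int))) (t.dropWhile (· == h))
termination_by l => l.length
decreasing_by
  simpa using Nat.lt_succ_of_le (List.length_dropWhile_le (· == h) t)

def err_stat_alt (pred_label : List Int) (True_label : List Int) (test_df : List String) (class_name : List String) : (List (String × Int)) × List String :=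
  let name_err_1 : List String :=
    (PySem.List.pyRange 0 pred_label.length 1).foldl
      (fun acc i =>
        if PySem.List.pyGetD pred_label i 0 ≠ PySem.List.pyGetD True_label i 0 then
          acc ++ [pvBase (PySem.List.pyGetD test_df i "")]
        else acc)
      []
  let tokens : List String := PySem.List.sorted (name_err_1.map pvHead) (fun x => x) false
  let groups : PySem.Dict String Int := pvGroup PySem.Dict.empty tokens
  let count_err : PySem.Dict String Int :=
    class_name.foldl (fun d j => d.insert j (groups.getD j 0)) PySem.Dict.empty
  (count_err.items, name_err_1)

-- ===== PRECONDITION & SPEC =====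
-- Pre_ excludes exactly the inputs on which the Python A raises an IndexError: True_label shorter
-- than pred_label, or a misclassified index with no test_df entry.
def Pre_err_stat (pred_label : List Int) (True_label : List Int) (test_df : List String) (class_name : List String) : Prop :=
  pred_label.length ≤ True_label.length ∧
  ∀ i ∈ List.range pred_label.length,
    pred_label.getD i 0 ≠ True_label.getD i 0 → i < test_df.length
instance (pred_label : List Int) (True_label : List Int) (test_df : List String) (class_name : List String) : Decidable (Pre_err_stat pred_label True_label test_df class_name) := by unfold Pre_err_stat; infer_instance

def pvWitness_err_stat : List Int × List Int × List String × List String :=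
  ([0, 1], [0, 2], ["x\\a_1", "b_2"], ["a", "b"])

def Spec_err_stat (pred_label : List Int) (True_label : List Int) (test_df : List String) (class_name : List String) (out : (List (String × Int)) × List String) : Prop := out = err_stat_alt pred_label True_label test_df class_name
instance (pred_label : List Int) (True_label : List Int) (test_df : List String) (class_name : List String) (out : (List (String × Int)) × List String) : Decidable (Spec_err_stat pred_label True_label test_df class_name out) := by unfold Spec_err_stat; infer_instance

-- ===== CLAIM (what is proved, stated in full; the proofs are below) =====
def Claim_equal_err_stat : Prop := ∀ (pred_label : List Int) (True_label : List Int) (test_df : List String) (class_name : List String), Dom_err_stat pred_label True_label test_df class_name → Pre_err_stat pred_label True_label test_df class_name → Spec_err_stat pred_label True_label test_df class_name (err_stat pred_label True_label test_df class_name)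

-- ===== LEMMAS AND PROOFS =====

-- A's name-extraction loop builds the two map lists
theorem pv_foldl_pair_map (C F : Int → String) (E : List Int) (a b : List String) :
    E.foldl (fun p i => (p.1 ++ [C i], p.2 ++ [F i])) (a, b) = (a ++ E.map C, b ++ E.map F) := by
  rw [PySem.List.foldl_prod_mk (fun l i => l ++ [C i]) (fun l i => l ++ [F i]) E a b,
      PySem.List.foldl_append_singleton_eq_map, PySem.List.foldl_append_singleton_eq_map]

-- lookups in B's run-length group table of a sorted list are occurrence counts
theorem pv_getD_group (l : List String) (hp : l.Pairwise (· ≤ ·)) (g : PySem.Dict String Int) (v : String) :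
    (pvGroup g l).getD v 0 = if v ∈ l then (l.count v : Int) else g.getD v 0 := by
  fun_induction pvGroup g l with
  | case1 g => simp
  | case2 g h t ih =>
    have ht : t.takeWhile (· == h) ++ t.dropWhile (· == h) = t := List.takeWhile_append_dropWhile
    have hw : ∀ x ∈ t.takeWhile (· == h), x = h := by
      intro x hx
      exact eq_of_beq (List.mem_takeWhile_imp (p := (· == h)) hx)
    have hple : ∀ y ∈ t, h ≤ y := fun y hy => List.rel_of_pairwise_cons hp hy
    have hpt : t.Pairwise (· ≤ ·) := hp.of_cons
    have hpd : (t.dropWhile (· == h)).Pairwise (· ≤ ·) := hpt.sublist (List.dropWhile_sublist _)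
    have hd : ∀ x ∈ t.dropWhile (· == h), x ≠ h := by
      intro x hx
      cases hdd : t.dropWhile (· == h) with
      | nil => rw [hdd] at hx; simp at hx
      | cons y0 d' =>
        rw [hdd] at hx hpd
        have hy0 : (y0 == h) = false := by
          have := List.head?_dropWhile_not (· == h) t
          rw [hdd] at this; simpa using this
        have hy0h : y0 ≠ h := by simpa using hy0
        have hy0t : y0 ∈ t := by
          rw [← ht, hdd]; exact List.mem_append_right _ List.mem_cons_self
        have hlt : h < y0 := lt_of_le_of_ne (hple y0 hy0t) (Ne.symm hy0h)
        rcases List.mem_cons.mp hx with rfl | hx'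
        · exact hy0h
        · have hle : y0 ≤ x := List.rel_of_pairwise_cons hpd hx'
          exact fun hxe => lt_irrefl h (lt_of_lt_of_le hlt (hxe ▸ hle))
    rw [ih hpd]
    have hcw : ∀ u : String, u ≠ h → (t.takeWhile (· == h)).count u = 0 := by
      intro u hu
      rw [List.count_eq_zero]
      exact fun hmem => hu (hw u hmem)
    by_cases hv : v ∈ t.dropWhile (· == h)
    · have hvh : v ≠ h := hd v hv
      have hvt : v ∈ h :: t := by
        apply List.mem_cons_of_mem
        rw [← ht]; exact List.mem_append_right _ hv
      rw [if_pos hv, if_pos hvt]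
      congr 1
      have hch : List.count v (h :: t) = List.count v t := by simp [Ne.symm hvh]
      rw [hch]
      conv_rhs => rw [← ht]
      rw [List.count_append, hcw v hvh]
      omega
    · rw [if_neg hv]
      by_cases hvh : v = h
      · subst hvh
        rw [if_pos List.mem_cons_self, PySem.Dict.getD_insert, if_pos rfl]
        have hcountw : (t.takeWhile (· == v)).count v = (t.takeWhile (· == v)).length :=
          List.count_eq_length.mpr (fun b hb => (hw b hb).symm)
        have hcountd : (t.dropWhile (· == v)).count v = 0 := by
          rw [List.count_eq_zero]; exact fun hmem => (hd v hmem) rfl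
        have hct : List.count v t = (t.takeWhile (· == v)).length := by
          conv_lhs => rw [← ht]
          rw [List.count_append, hcountw, hcountd]
          omega
        rw [List.count_cons_self, hct]
        push_cast; ring
      · have hvnt : v ∉ h :: t := by
          intro hmem
          rcases List.mem_cons.mp hmem with rfl | hmem'
          · exact hvh rfl
          · rw [← ht] at hmem'
            rcases List.mem_append.mp hmem' with hmem'' | hmem''
            · exact hvh (hw v hmem'')
            · exact hv hmem''
        rw [if_neg hvnt, PySem.Dict.getD_insert, if_neg hvh]

-- B's group-table lookup of the sorted tokens is A's .count of the unsorted tokens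
theorem pv_group_count (xs : List String) (v : String) :
    (pvGroup PySem.Dict.empty (PySem.List.sorted xs (fun x => x) false)).getD v 0
      = (xs.count v : Int) := by
  have hp : (PySem.List.sorted xs (fun x => x) false).Pairwise (· ≤ ·) :=
    PySem.List.sorted_pairwise xs (fun x => x)
  have hperm : (PySem.List.sorted xs (fun x => x) false).Perm xs :=
    PySem.List.sorted_perm xs (fun x => x) false
  rw [pv_getD_group _ hp]
  by_cases hv : v ∈ PySem.List.sorted xs (fun x => x) false
  · rw [if_pos hv, hperm.count_eq]
  · rw [if_neg hv]
    have : xs.count v = 0 := by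
      rw [List.count_eq_zero]
      exact fun hmem => hv ((PySem.List.mem_sorted ..).mpr hmem)
    rw [this]
    simp

-- the per-class insert of A's .count and of B's group-table lookup write the same value
theorem pv_insert_funs (M : List String) :
    (fun (d : PySem.Dict String Int) (j : String) => d.insert j ((PySem.List.count M j : Int)))
      = fun d j => d.insert j ((pvGroup PySem.Dict.empty (PySem.List.sorted M (fun x => x) false)).getD j 0) := by
  funext d j
  rw [pv_group_count]
  simp [PySem.List.count_eq]

-- ===== VERDICT (by name: the statement is the Claim_ definition above) =====
theorem err_stat_spec : Claim_equal_err_stat := by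
  intro pred_label True_label test_df class_name _hdom _hpre
  unfold Spec_err_stat
  simp only [err_stat, err_stat_alt]
  rw [PySem.List.foldl_append_ite_eq_filter, pv_foldl_pair_map,
      PySem.List.foldl_append_ite (fun i => PySem.List.pyGetD pred_label i 0 ≠ PySem.List.pyGetD True_label i 0)
        (fun i => pvBase (PySem.List.pyGetD test_df i ""))]
  simp only [List.nil_append]
  have hmap : ((((PySem.List.pyRange 0 ↑pred_label.length 1).filter
        (fun i => decide (PySem.List.pyGetD pred_label i 0 ≠ PySem.List.pyGetD True_label i 0))).map
        (fun i => pvBase (PySem.List.pyGetD test_df i ""))).map pvHead)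
      = ((PySem.List.pyRange 0 ↑pred_label.length 1).filter
        (fun i => decide (PySem.List.pyGetD pred_label i 0 ≠ PySem.List.pyGetD True_label i 0))).map
        (fun i => pvHead (pvBase (PySem.List.pyGetD test_df i ""))) := by
    rw [List.map_map, Function.comp_def]
  rw [hmap, pv_insert_funs]
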